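-- pv_equiv track=rewrite | github.com/EastforTest/api_test | packegedemo1/demo0505.py | removeArr
-- ===== SOURCE A (Python) =====
-- def removeArr(nums,val):
--     fast = 0
--     slow = 0
--     while fast < len(nums):
--         if nums[fast] != val:
--             nums[slow] = nums[fast]
--             slow +=1
--         fast += 1
--     return slow
-- ===== SOURCE B (Python) =====
-- def removeArr(nums, val):
--     kept = [x for x in nums if x != val]
--     for i, v in enumerate(kept):
--         nums[i] = v
--     return len(kept)
-- ===== Notes on version B (the rewrite author's own statement) =====
-- stated objective: simpler
-- what changed: Replaces the fused two-pointer compaction loop by two shaped passes: build the filtered list with a comprehension, copy it back over the prefix, and return its length.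
import Mathlib
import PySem

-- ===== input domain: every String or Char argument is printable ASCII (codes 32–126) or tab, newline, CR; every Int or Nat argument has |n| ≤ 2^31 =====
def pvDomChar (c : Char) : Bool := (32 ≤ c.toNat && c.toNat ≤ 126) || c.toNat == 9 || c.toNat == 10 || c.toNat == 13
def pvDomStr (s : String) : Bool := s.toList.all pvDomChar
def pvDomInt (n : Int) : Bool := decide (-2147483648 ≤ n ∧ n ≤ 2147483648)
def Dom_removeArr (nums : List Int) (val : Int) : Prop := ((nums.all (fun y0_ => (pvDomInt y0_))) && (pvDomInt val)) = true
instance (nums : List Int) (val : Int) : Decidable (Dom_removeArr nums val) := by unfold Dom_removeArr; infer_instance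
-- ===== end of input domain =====

-- B replaces A's fused two-pointer compaction by a filter pass plus a copy-back pass (simpler).
-- Both A and B mutate `nums` in place in Python; the equivalence proved here is about the RETURN value only.

-- ===== PORT A =====
-- the while loop: state is the (mutated) list, `fast` and `slow`
def removeArrLoop (val : Int) (nums : List Int) (fast slow : Nat) : Int :=
  if h : fast < nums.length then
    if nums[fast] ≠ val then
      removeArrLoop val (nums.set slow nums[fast]) (fast + 1) (slow + 1)
    else
      removeArrLoop val nums (fast + 1) slow
  else
    (slow : Int)
termination_by nums.length - fast
decreasing_by all_goals (try simp only [List.length_set]); all_goals omega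

def removeArr (nums : List Int) (val : Int) : Int :=
  removeArrLoop val nums 0 0

-- ===== PORT B =====
-- kept = [x for x in nums if x != val]; (copy-back mutates nums, not the result); return len(kept)
def removeArr_alt (nums : List Int) (val : Int) : Int :=
  ((nums.filter (fun x => x ≠ val)).length : Int)

-- ===== PRECONDITION & SPEC =====
def Spec_removeArr (nums : List Int) (val : Int) (out : Int) : Prop := out = removeArr_alt nums val
instance (nums : List Int) (val : Int) (out : Int) : Decidable (Spec_removeArr nums val out) := by unfold Spec_removeArr; infer_instance

-- ===== CLAIM (what is proved, stated in full; the proofs are below) =====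
def Claim_equal_removeArr : Prop := ∀ (nums : List Int) (val : Int), Dom_removeArr nums val → Spec_removeArr nums val (removeArr nums val)

-- ===== LEMMAS AND PROOFS =====
theorem removeArrLoop_eq (val : Int) (nums : List Int) (fast slow : Nat)
    (hsf : slow ≤ fast) :
    removeArrLoop val nums fast slow =
      (slow : Int) + (((nums.drop fast).filter (fun x => x ≠ val)).length : Int) := by
  induction nums, fast, slow using removeArrLoop.induct val with
  | case1 nums fast slow h hne ih =>
    rw [removeArrLoop]
    simp only [h, dite_true]
    rw [if_pos (by simpa using hne)]
    rw [ih (by omega)]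
    have hdrop : (nums.set slow nums[fast]).drop (fast + 1) = nums.drop (fast + 1) := by
      apply List.ext_getElem
      · simp
      · intro i h1 h2
        simp only [List.getElem_drop, List.getElem_set]
        rw [if_neg (by omega)]
    rw [hdrop]
    rw [List.drop_eq_getElem_cons h, List.filter_cons, if_pos (by simpa using hne)]
    simp; omega
  | case2 nums fast slow h hne ih =>
    rw [removeArrLoop]
    simp only [h, dite_true]
    rw [if_neg (by simpa using hne)]
    rw [ih (by omega)]
    rw [List.drop_eq_getElem_cons h, List.filter_cons, if_neg (by simpa using hne)]
  | case3 nums fast slow h =>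
    rw [removeArrLoop]
    simp only [h, dite_false]
    rw [List.drop_of_length_le (by omega)]
    simp

-- ===== VERDICT (by name: the statement is the Claim_ definition above) =====
theorem removeArr_spec : Claim_equal_removeArr := by
  intro nums val _
  unfold Spec_removeArr removeArr removeArr_alt
  rw [removeArrLoop_eq val nums 0 0 (le_refl 0)]
  simp
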